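-- pv_equiv track=rewrite | github.com/bfabiandev/GoogleCodeJam | Pylons.py | solve
-- ===== SOURCE A (Python) =====
-- def is_valid(source, target):
--     if not source:
--         return True
--     if source[0] == target[0] or source[1] == target[1] or source[0] + source[1] == target[0] + target[1] \
--             or source[0] - source[1] == target[0] - target[1]:
--         return False
--     return True
--
-- def solve(available_tiles, selected_tiles):
--     if len(available_tiles) == 0:
--         return []
--
--     prev_tile = selected_tiles[-1] if len(selected_tiles) > 0 else None
--
--     for tile in available_tiles:
--         if is_valid(prev_tile, tile):
--             new_selected_tiles = selected_tiles.copy()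
--             new_available_tiles = available_tiles.copy()
--             new_selected_tiles.append(tile)
--             new_available_tiles.remove(tile)
--             solution_from_here = solve(new_available_tiles, new_selected_tiles)
--             if solution_from_here is None:
--                 continue
--             return [tile] + solution_from_here
--     return None
-- ===== SOURCE B (Python) =====
-- def solve(available_tiles, selected_tiles):
--     if not available_tiles:
--         return []
--     prev0 = selected_tiles[-1] if selected_tiles else None
--     stack = [(prev0, list(available_tiles), 0)]
--     path = []
--     while stack:
--         prev, avail, i = stack.pop()
--         if i == len(avail):
--             if path:
--                 path.pop()
--             continue
--         tile = avail[i]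
--         stack.append((prev, avail, i + 1))
--         if prev is not None and (prev[0] == tile[0] or prev[1] == tile[1]
--                                  or prev[0] + prev[1] == tile[0] + tile[1]
--                                  or prev[0] - prev[1] == tile[0] - tile[1]):
--             continue
--         path = path + [tile]
--         rest = avail.copy()
--         rest.remove(tile)
--         if not rest:
--             return path
--         stack.append((tile, rest, 0))
--     return None
-- ===== Notes on version B (the rewrite author's own statement) =====
-- stated objective: alternative
-- what changed: Replaces A's recursive backtracking (each level copies the lists and recurses) by an iterative depth-first search over an explicit stack of resumption frames (prev tile, remaining tiles, next index) with an accumulated path that is truncated on backtrack.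
import Mathlib
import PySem

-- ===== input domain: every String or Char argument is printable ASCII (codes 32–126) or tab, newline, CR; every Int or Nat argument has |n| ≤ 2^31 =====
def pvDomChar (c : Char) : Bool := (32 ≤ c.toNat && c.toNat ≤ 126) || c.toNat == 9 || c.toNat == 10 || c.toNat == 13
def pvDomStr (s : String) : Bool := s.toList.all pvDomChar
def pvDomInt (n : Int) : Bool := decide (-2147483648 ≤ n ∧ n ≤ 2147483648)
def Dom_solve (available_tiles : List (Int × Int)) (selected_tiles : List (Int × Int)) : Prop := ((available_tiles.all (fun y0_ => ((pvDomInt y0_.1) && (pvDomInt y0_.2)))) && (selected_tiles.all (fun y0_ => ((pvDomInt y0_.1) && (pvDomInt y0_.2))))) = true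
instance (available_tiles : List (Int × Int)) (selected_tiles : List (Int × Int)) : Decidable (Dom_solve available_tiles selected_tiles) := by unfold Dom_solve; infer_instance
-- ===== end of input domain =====

-- B replaces A's recursive backtracking by an iterative explicit-stack DFS with an accumulated path (alternative decomposition, same cost).


-- ===== PORT A =====
-- Python helper is_valid(source, target): source is None or a (nonempty) tuple, so `not source` ↔ source is None.
def is_valid (source : Option (Int × Int)) (target : Int × Int) : Bool :=
  match source with
  | none => true
  | some s =>
    if s.1 == target.1 || s.2 == target.2 || s.1 + s.2 == target.1 + target.2
        || s.1 - s.2 == target.1 - target.2 then false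
    else true

-- A's `for tile in available_tiles` with early return; `recur` is the recursive call to solve
-- (structural-recursion encoding: solveF passes itself at one fuel less).
def loopRA (recur : List (Int × Int) → List (Int × Int) → Option (List (Int × Int)))
    (prev : Option (Int × Int)) (avail sel : List (Int × Int)) :
    List (Int × Int) → Option (List (Int × Int))
  | [] => none
  | t :: ts =>
    if is_valid prev t then
      match PySem.List.remove? avail t with   -- new_available_tiles.remove(tile); never raises (t ∈ avail)
      | none => none
      | some rest =>
        match recur rest (sel ++ [t]) with
        | none => loopRA recur prev avail sel ts
        | some s => some (t :: s)
    else loopRA recur prev avail sel ts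

-- fuel = available_tiles.length always suffices: each recursive call removes one tile.
def solveF : Nat → List (Int × Int) → List (Int × Int) → Option (List (Int × Int))
  | 0, avail, _ => if avail.length = 0 then some [] else none   -- fuel 0 unreachable with nonempty avail
  | n + 1, avail, sel =>
    if avail.length = 0 then some [] else
    let prev := if sel.length > 0 then PySem.List.pyGet? sel (-1) else none
    loopRA (solveF n) prev avail sel avail

def solve (available_tiles : List (Int × Int)) (selected_tiles : List (Int × Int)) : Option (List (Int × Int)) :=
  solveF available_tiles.length available_tiles selected_tiles

-- ===== PORT B =====
-- Termination bookkeeping for B's while-loop: a frame (prev, avail, i) still owes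
-- (avail.length - i) choices, each costing at most pvC avail.length steps.
def pvC : Nat → Nat
  | 0 => 2
  | n + 1 => n * pvC n + 2

def pvPsi (f : Option (Int × Int) × List (Int × Int) × Nat) : Nat :=
  (f.2.1.length - f.2.2) * pvC f.2.1.length + 1

def pvMu (stack : List (Option (Int × Int) × List (Int × Int) × Nat)) : Nat :=
  (stack.map pvPsi).sum

theorem pvC_pos (n : Nat) : 0 < pvC n := by
  cases n <;> simp [pvC]

theorem pvMu_pop (f : Option (Int × Int) × List (Int × Int) × Nat)
    (stack : List (Option (Int × Int) × List (Int × Int) × Nat)) :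
    pvMu stack < pvMu (f :: stack) := by
  simp [pvMu, pvPsi]

theorem pvMu_skip (prev : Option (Int × Int)) (avail : List (Int × Int)) (i : Nat)
    (stack : List (Option (Int × Int) × List (Int × Int) × Nat)) (h : i < avail.length) :
    pvMu ((prev, avail, i + 1) :: stack) < pvMu ((prev, avail, i) :: stack) := by
  have hc := pvC_pos avail.length
  simp [pvMu, pvPsi]
  have h1 : avail.length - i = (avail.length - (i + 1)) + 1 := by omega
  rw [h1]
  generalize (avail.length - (i + 1)) = d
  generalize pvC avail.length = c at *
  nlinarith

theorem pvMu_push (tile : Int × Int) (prev : Option (Int × Int)) (avail rest : List (Int × Int))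
    (i : Nat) (stack : List (Option (Int × Int) × List (Int × Int) × Nat))
    (hi : i < avail.length) (hr : rest.length + 1 = avail.length) :
    pvMu ((tile, rest, 0) :: (prev, avail, i + 1) :: stack) < pvMu ((prev, avail, i) :: stack) := by
  simp [pvMu, pvPsi]
  have h1 : avail.length - i = (avail.length - (i + 1)) + 1 := by omega
  rw [h1]
  have h2 : pvC avail.length = rest.length * pvC rest.length + 2 := by
    rw [← hr]; simp [pvC]
  rw [h2]
  generalize (avail.length - (i + 1)) = d
  generalize pvC rest.length = c
  nlinarith

-- B's while-loop: the top frame is tried at index i; exhausted frames pop a path element.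
def solveLoop (stack : List (Option (Int × Int) × List (Int × Int) × Nat))
    (path : List (Int × Int)) : Option (List (Int × Int)) :=
  match stack with
  | [] => none
  | (prev, avail, i) :: stackRest =>
    if i == avail.length then
      solveLoop stackRest path.dropLast
    else
      match _hTile : PySem.List.pyGet? avail (i : Int) with
      | none => none   -- unreachable: 0 ≤ i < len
      | some tile =>
        if (match prev with
            | some p => p.1 == tile.1 || p.2 == tile.2 || p.1 + p.2 == tile.1 + tile.2
                || p.1 - p.2 == tile.1 - tile.2
            | none => false) then
          solveLoop ((prev, avail, i + 1) :: stackRest) path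
        else
          let path' := path ++ [tile]
          match hRest : PySem.List.remove? avail tile with
          | none => none   -- unreachable: tile ∈ avail
          | some rest =>
            if rest.isEmpty then some path'
            else solveLoop ((tile, rest, 0) :: (prev, avail, i + 1) :: stackRest) path'
termination_by pvMu stack
decreasing_by
  · exact pvMu_pop _ _
  · apply pvMu_skip
    have : avail[i]? = some tile := by simpa using _hTile
    exact (List.getElem?_eq_some_iff.mp this).1
  · have hmem : tile ∈ avail := by
      have : avail[i]? = some tile := by simpa using _hTile
      exact List.mem_of_getElem? this
    have hi : i < avail.length := by
      have : avail[i]? = some tile := by simpa using _hTile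
      exact (List.getElem?_eq_some_iff.mp this).1
    apply pvMu_push _ _ _ _ _ _ hi
    have := PySem.List.remove?_eq_some_erase avail tile hmem
    rw [this] at hRest
    cases hRest
    have := List.length_erase_of_mem hmem
    omega

def solve_alt (available_tiles : List (Int × Int)) (selected_tiles : List (Int × Int)) : Option (List (Int × Int)) :=
  if available_tiles.isEmpty then some [] else
  let prev0 := if selected_tiles.isEmpty then none else PySem.List.pyGet? selected_tiles (-1)
  solveLoop [(prev0, available_tiles, 0)] []

-- ===== PRECONDITION & SPEC =====
def Spec_solve (available_tiles : List (Int × Int)) (selected_tiles : List (Int × Int)) (out : Option (List (Int × Int))) : Prop := out = solve_alt available_tiles selected_tiles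
instance (available_tiles : List (Int × Int)) (selected_tiles : List (Int × Int)) (out : Option (List (Int × Int))) : Decidable (Spec_solve available_tiles selected_tiles out) := by unfold Spec_solve; infer_instance

-- ===== CLAIM (what is proved, stated in full; the proofs are below) =====
def Claim_equal_solve : Prop := ∀ (available_tiles : List (Int × Int)) (selected_tiles : List (Int × Int)), Dom_solve available_tiles selected_tiles → Spec_solve available_tiles selected_tiles (solve available_tiles selected_tiles)

-- ===== LEMMAS AND PROOFS =====

-- B's inline attack test is the negation of A's is_valid.
theorem pvCond_eq (prev : Option (Int × Int)) (t : Int × Int) :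
    (match prev with
     | some p => p.1 == t.1 || p.2 == t.2 || p.1 + p.2 == t.1 + t.2 || p.1 - p.2 == t.1 - t.2
     | none => false) = !(is_valid prev t) := by
  cases prev with
  | none => simp [is_valid]
  | some p =>
    simp only [is_valid]
    split_ifs with h <;> simp_all

theorem solveF_nil (n : Nat) (sel : List (Int × Int)) : solveF n [] sel = some [] := by
  cases n <;> simp [solveF]

theorem solveF_cons (m : Nat) (avail sel : List (Int × Int)) (h : avail ≠ []) :
    solveF (m + 1) avail sel =
      loopRA (solveF m) (if sel.length > 0 then PySem.List.pyGet? sel (-1) else none)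
        avail sel avail := by
  simp [solveF, List.length_eq_zero_iff, h]

-- One step of B's loop when the top frame still has a candidate at index i.
theorem solveLoop_step (prev : Option (Int × Int)) (avail : List (Int × Int)) (i : Nat)
    (stack : List (Option (Int × Int) × List (Int × Int) × Nat)) (path : List (Int × Int))
    (t : Int × Int) (rest : List (Int × Int))
    (hget : PySem.List.pyGet? avail (i : Int) = some t)
    (hi : (i == avail.length) = false)
    (hrem : PySem.List.remove? avail t = some rest) :
    solveLoop ((prev, avail, i) :: stack) path =
      (if (match prev with
           | some p => p.1 == t.1 || p.2 == t.2 || p.1 + p.2 == t.1 + t.2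
               || p.1 - p.2 == t.1 - t.2
           | none => false) then
        solveLoop ((prev, avail, i + 1) :: stack) path
       else
        if rest.isEmpty then some (path ++ [t])
        else solveLoop ((some t, rest, 0) :: (prev, avail, i + 1) :: stack) (path ++ [t])) := by
  rw [solveLoop]
  simp only [hi, Bool.false_eq_true, if_false]
  split
  · rename_i h
    rw [hget] at h
    exact absurd h (by simp)
  · rename_i tile h
    rw [hget] at h
    injection h with h
    subst h
    cases hc : (match prev with
        | some p => p.1 == t.1 || p.2 == t.2 || p.1 + p.2 == t.1 + t.2
            || p.1 - p.2 == t.1 - t.2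
        | none => false) with
    | true => simp
    | false =>
      simp only [Bool.false_eq_true, if_false]
      split
      · rename_i h2
        rw [hrem] at h2
        exact absurd h2 (by simp)
      · rename_i r h2
        rw [hrem] at h2
        injection h2 with h2
        subst h2
        rfl

-- Simulation: B's loop with top frame (prev, avail, i) behaves like A's scan of avail
-- from index i; on failure it resumes the rest of the stack with the path popped.
theorem pvSim (fuel : Nat) :
    ∀ (avail sel : List (Int × Int)) (prev : Option (Int × Int))
      (stack : List (Option (Int × Int) × List (Int × Int) × Nat))
      (cands : List (Int × Int)) (i : Nat) (path : List (Int × Int)),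
      avail ≠ [] → avail.length ≤ fuel → i ≤ avail.length → avail.drop i = cands →
      prev = (if sel.length > 0 then PySem.List.pyGet? sel (-1) else none) →
      solveLoop ((prev, avail, i) :: stack) path =
        (match loopRA (solveF (fuel - 1)) prev avail sel cands with
         | some s => some (path ++ s)
         | none => solveLoop stack path.dropLast) := by
  induction fuel with
  | zero =>
    intro avail sel prev stack cands i path hne hlen
    exact absurd (List.length_eq_zero_iff.mp (Nat.le_zero.mp hlen)) hne
  | succ n ihf =>
    intro avail sel prev stack cands
    induction cands with
    | nil =>
      intro i path hne hlen hile hdrop hprev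
      have hieq : i = avail.length := le_antisymm hile (List.drop_eq_nil_iff.mp hdrop)
      rw [solveLoop]
      simp [loopRA, hieq]
    | cons t ts ihc =>
      intro i path hne hlen hile hdrop hprev
      have hne' : avail.drop i ≠ [] := by rw [hdrop]; simp
      have hi : i < avail.length := by
        by_contra hc
        exact hne' (List.drop_eq_nil_iff.mpr (Nat.le_of_not_lt hc))
      have hget : avail[i]? = some t := by
        rw [← List.head?_drop, hdrop]; rfl
      have hgetPy : PySem.List.pyGet? avail (i : Int) = some t := by
        simpa using hget
      have hts : avail.drop (i + 1) = ts := by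
        rw [← List.tail_drop, hdrop]
        rfl
      have hmem : t ∈ avail := List.mem_of_getElem? hget
      have hbeq : (i == avail.length) = false := by simp [Nat.ne_of_lt hi]
      have hrem : PySem.List.remove? avail t = some (avail.erase t) :=
        PySem.List.remove?_eq_some_erase avail t hmem
      rw [solveLoop_step prev avail i stack path t (avail.erase t) hgetPy hbeq hrem]
      rw [pvCond_eq]
      cases hv : is_valid prev t with
      | false =>
        simp only [Bool.not_false, if_true]
        rw [ihc (i + 1) path hne hlen (by omega) hts hprev]
        simp [loopRA, hv]
      | true =>
        simp only [Bool.not_true, Bool.false_eq_true, if_false]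
        simp only [loopRA, hv, if_true, hrem, Nat.add_sub_cancel]
        have hlenE : (avail.erase t).length = avail.length - 1 :=
          List.length_erase_of_mem hmem
        by_cases he : avail.erase t = []
        · simp [he, solveF_nil]
        · have hE : ((avail.erase t).isEmpty = true) = False := by simp [he]
          simp only [hE, if_false]
          have hlen1 : 1 ≤ (avail.erase t).length := by
            cases hx : avail.erase t with
            | nil => exact absurd hx he
            | cons a l => simp
          obtain ⟨m, rfl⟩ : ∃ m, n = m + 1 := ⟨n - 1, by omega⟩
          have hsf : solveF (m + 1) (avail.erase t) (sel ++ [t]) =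
              loopRA (solveF m) (some t) (avail.erase t) (sel ++ [t]) (avail.erase t) := by
            rw [solveF_cons m _ _ he]
            congr 1
            simp [PySem.List.pyGet?_neg_one_append_singleton]
          rw [ihf (avail.erase t) (sel ++ [t]) (some t) ((prev, avail, i + 1) :: stack)
              (avail.erase t) 0 (path ++ [t]) he (by omega) (by omega) rfl
              (by simp [PySem.List.pyGet?_neg_one_append_singleton])]
          simp only [Nat.add_sub_cancel]
          rw [← hsf]
          cases hres : solveF (m + 1) (avail.erase t) (sel ++ [t]) with
          | some s => simp
          | none =>
            simp only [List.dropLast_concat]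
            rw [ihc (i + 1) path hne hlen (by omega) hts hprev]
            simp only [Nat.add_sub_cancel]

theorem solve_spec : Claim_equal_solve := by
  intro avail sel _
  unfold Spec_solve solve solve_alt
  cases havail : avail with
  | nil => simp [solveF_nil]
  | cons a l =>
    have hne : avail ≠ [] := by rw [havail]; simp
    rw [← havail]
    have hIE : ¬ (avail.isEmpty = true) := by simp [hne]
    rw [if_neg hIE]
    have hprev : (if sel.isEmpty then none else PySem.List.pyGet? sel (-1))
        = (if sel.length > 0 then PySem.List.pyGet? sel (-1) else none) := by
      cases sel <;> simp
    rw [hprev]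
    rw [pvSim avail.length avail sel _ [] avail 0 [] hne le_rfl (by omega) rfl rfl]
    obtain ⟨m, hm⟩ : ∃ m, avail.length = m + 1 := ⟨l.length, by rw [havail]; rfl⟩
    rw [hm, Nat.add_sub_cancel, solveF_cons m avail sel hne]
    cases loopRA (solveF m) (if sel.length > 0 then PySem.List.pyGet? sel (-1) else none)
        avail sel avail with
    | none => rw [solveLoop]
    | some s => simp
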